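-- pv_equiv track=rewrite | github.com/jsemric/advent-of-code-2019 | day04.py | desc
-- ===== SOURCE A (Python) =====
-- def desc(x):
--     p = x[0]
--     eq = 0
--     l = set()
--     for i in x[1:]:
--         if p == i:
--             eq += 1
--         elif p > i:
--             return False
--         else:
--             l.add(eq)
--             eq = 0
--         p = i
--     l.add(eq)
--     return 1 in l
-- ===== SOURCE B (Python) =====
-- def desc(x):
--     if any(a > b for a, b in zip(x, x[1:])):
--         return False
--     return any(x.count(v) == 2 for v in set(x))
-- ===== Notes on version B (the rewrite author's own statement) =====
-- stated objective: idiomatic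
-- what changed: A is a stateful single-pass state machine tracking the previous element, an equal-run counter and a set of run counts; B separates the two concerns: one adjacent-pair scan for non-decreasingness, then (since in a non-decreasing list equal values are contiguous) a multiset check that some value occurs exactly twice.
import Mathlib
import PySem

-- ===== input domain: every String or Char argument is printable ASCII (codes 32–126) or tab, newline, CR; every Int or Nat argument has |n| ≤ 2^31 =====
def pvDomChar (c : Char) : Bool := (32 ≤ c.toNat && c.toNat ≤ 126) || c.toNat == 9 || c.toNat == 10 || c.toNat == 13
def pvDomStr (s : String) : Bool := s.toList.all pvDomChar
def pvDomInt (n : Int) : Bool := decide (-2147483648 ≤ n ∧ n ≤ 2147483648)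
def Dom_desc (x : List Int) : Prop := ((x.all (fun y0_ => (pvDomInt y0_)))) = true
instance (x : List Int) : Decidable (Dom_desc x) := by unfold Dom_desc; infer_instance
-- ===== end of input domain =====

-- B replaces A's single-pass run-tracking state machine by a sortedness scan plus a
-- multiset occurrence check (idiomatic decomposition; same result on every non-empty list).

-- ===== PORT A =====
-- A's 'for i in x[1:]' loop, with state p (previous), eq (current equal-run counter), l (set of counts)
def descLoop (p eq : Int) (l : PySem.Set Int) : List Int → Bool
  | [] => (PySem.Set.add l eq).contains 1          -- l.add(eq); return 1 in l
  | i :: rest =>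
    if p == i then descLoop p (eq + 1) l rest
    else if p > i then false
    else descLoop i 0 (PySem.Set.add l eq) rest    -- l.add(eq); eq = 0  (p := i; in the first branch p = i already)

def desc (x : List Int) : Bool :=
  match x with
  | [] => false                                    -- Python raises IndexError reading the first element; excluded by Pre_desc
  | p :: rest => descLoop p 0 PySem.Set.empty rest -- head = first element, rest = x[1:]

-- ===== PORT B =====
def desc_alt (x : List Int) : Bool :=
  if (x.zip (PySem.List.slice x (some 1) none)).any (fun ab => ab.1 > ab.2) then false
  else (PySem.Set.ofList x).any (fun v => PySem.List.count x v == 2)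

-- ===== PRECONDITION & SPEC =====
-- Pre_desc excludes only the empty list, on which A raises IndexError reading the first element.
def Pre_desc (x : List Int) : Prop := x ≠ []
instance (x : List Int) : Decidable (Pre_desc x) := by unfold Pre_desc; infer_instance
def pvWitness_desc : List Int := ([1, 1, 2])

def Spec_desc (x : List Int) (out : Bool) : Prop := out = desc_alt x
instance (x : List Int) (out : Bool) : Decidable (Spec_desc x out) := by unfold Spec_desc; infer_instance

-- ===== CLAIM (what is proved, stated in full; the proofs are below) =====
def Claim_equal_desc : Prop := ∀ (x : List Int), Dom_desc x → Pre_desc x → Spec_desc x (desc x)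

-- ===== LEMMAS AND PROOFS =====

-- for (· ≤ ·) pairwiseness is checked on adjacent pairs
theorem pairwise_le_cons_cons {a b : Int} {u : List Int} :
    List.Pairwise (· ≤ ·) (a :: b :: u) ↔ a ≤ b ∧ List.Pairwise (· ≤ ·) (b :: u) := by
  constructor
  · intro h
    rcases List.pairwise_cons.mp h with ⟨hall, ht⟩
    exact ⟨hall b List.mem_cons_self, ht⟩
  · rintro ⟨hab, ht⟩
    refine List.pairwise_cons.mpr ⟨?_, ht⟩
    intro c hc
    rcases List.mem_cons.mp hc with rfl | hc'
    · exact hab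
    · exact le_trans hab ((List.pairwise_cons.mp ht).1 c hc')

-- count is unchanged by consing a different head
theorem count_cons_ne {v a : Int} (h : v ≠ a) (l : List Int) :
    List.count v (a :: l) = List.count v l := by
  simp [Ne.symm h]

-- B's adjacent-pair scan decides pairwise non-decreasingness
theorem zipAny_eq_false_iff (x : List Int) :
    ((x.zip x.tail).any (fun ab => ab.1 > ab.2) = false) ↔ List.Pairwise (· ≤ ·) x := by
  induction x with
  | nil => simp
  | cons a t ih =>
    cases t with
    | nil => simp
    | cons b u =>
      simp only [List.tail_cons] at ih
      simp only [List.tail_cons, List.zip_cons_cons, List.any_cons, Bool.or_eq_false_iff,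
        decide_eq_false_iff_not, not_lt, pairwise_le_cons_cons]
      exact and_congr Iff.rfl ih

-- A's early return: on a list with an adjacent decrease the loop returns false whatever its state.
theorem descLoop_not_sorted (rest : List Int) : ∀ (p eq : Int) (l : PySem.Set Int),
    ¬ List.Pairwise (· ≤ ·) (p :: rest) → descLoop p eq l rest = false := by
  induction rest with
  | nil => intro p eq l h; exact absurd (List.pairwise_singleton _ _) h
  | cons i t ih =>
    intro p eq l h
    simp only [descLoop]
    by_cases hpi : p = i
    · subst hpi
      have hnt : ¬ List.Pairwise (· ≤ ·) (p :: t) := by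
        intro hc
        exact h (pairwise_le_cons_cons.mpr ⟨le_refl p, hc⟩)
      simp [ih p (eq + 1) l hnt]
    · by_cases hgt : p > i
      · simp [hpi, hgt]
      · have hle : p ≤ i := le_of_not_gt hgt
        have hnt : ¬ List.Pairwise (· ≤ ·) (i :: t) := by
          intro hc
          exact h (pairwise_le_cons_cons.mpr ⟨hle, hc⟩)
        simp [hpi, hgt, ih i 0 (PySem.Set.add l eq) hnt]

-- A's loop on a sorted suffix: true iff 1 was already collected, or the run through p closes at
-- total length eq + (multiplicity of p) + 1 = 3 equal signs... stated via counts: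
theorem descLoop_sorted (rest : List Int) : ∀ (p eq : Int) (l : PySem.Set Int),
    List.Pairwise (· ≤ ·) (p :: rest) →
    (descLoop p eq l rest = true ↔
      ((1 : Int) ∈ l ∨ eq + (List.count p (p :: rest) : Int) = 2 ∨
        ∃ v ∈ rest, p < v ∧ List.count v rest = 2)) := by
  induction rest with
  | nil =>
    intro p eq l _
    simp only [descLoop, PySem.Set.contains_iff, PySem.Set.mem_add]
    constructor
    · rintro (h1 | h1)
      · exact Or.inl h1
      · subst h1; right; left; simp
    · rintro (h1 | h1 | ⟨v, hv, _⟩)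
      · exact Or.inl h1
      · right; simp at h1; omega
      · simp at hv
  | cons i t ih =>
    intro p eq l hs
    have hpi : p ≤ i := (pairwise_le_cons_cons.mp hs).1
    have ht : List.Pairwise (· ≤ ·) (i :: t) := (pairwise_le_cons_cons.mp hs).2
    simp only [descLoop]
    by_cases heq : p = i
    · subst heq
      rw [if_pos (by simp), ih p (eq + 1) l ht]
      have hc : (List.count p (p :: p :: t) : Int) = (List.count p (p :: t) : Int) + 1 := by
        simp
      constructor
      · rintro (h1 | h1 | ⟨v, hv, hpv, hv2⟩)
        · exact Or.inl h1
        · right; left; omega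
        · right; right
          refine ⟨v, List.mem_cons_of_mem _ hv, hpv, ?_⟩
          rw [count_cons_ne (by omega) t]; exact hv2
      · rintro (h1 | h1 | ⟨v, hv, hpv, hv2⟩)
        · exact Or.inl h1
        · right; left; omega
        · right; right
          rcases List.mem_cons.mp hv with rfl | hv'
          · omega
          · refine ⟨v, hv', hpv, ?_⟩
            rw [count_cons_ne (by omega) t] at hv2; exact hv2
    · have hlt : p < i := lt_of_le_of_ne hpi heq
      have hge : ∀ v ∈ i :: t, i ≤ v := by
        intro v hv
        rcases List.mem_cons.mp hv with rfl | hv'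
        · exact le_refl _
        · exact (List.pairwise_cons.mp ht).1 v hv'
      have hnotin : p ∉ i :: t := fun hmem => absurd (hge p hmem) (by omega)
      have hcp : List.count p (p :: i :: t) = 1 := by
        rw [List.count_cons_self, List.count_eq_zero.mpr hnotin]
      rw [if_neg (by simp [heq]), if_neg (by simp; omega), ih i 0 (PySem.Set.add l eq) ht]
      simp only [PySem.Set.mem_add, hcp]
      constructor
      · rintro ((h1 | h1) | h1 | ⟨v, hv, hiv, hv2⟩)
        · exact Or.inl h1
        · right; left; omega
        · right; right
          exact ⟨i, List.mem_cons_self, hlt, by omega⟩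
        · right; right
          refine ⟨v, List.mem_cons_of_mem _ hv, lt_trans hlt hiv, ?_⟩
          rw [count_cons_ne (by omega) t]; exact hv2
      · rintro (h1 | h1 | ⟨v, hv, hpv, hv2⟩)
        · exact Or.inl (Or.inl h1)
        · exact Or.inl (Or.inr (by omega))
        · by_cases hvi : v = i
          · subst hvi; right; left; omega
          · right; right
            rcases List.mem_cons.mp hv with rfl | hv'
            · exact absurd rfl hvi
            · refine ⟨v, hv', lt_of_le_of_ne (hge v hv) (Ne.symm hvi), ?_⟩
              rw [count_cons_ne hvi t] at hv2; exact hv2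

-- under non-decreasingness A's run criterion is the multiset criterion
theorem runs_iff_count (p : Int) (rest : List Int)
    (hs : List.Pairwise (· ≤ ·) (p :: rest)) :
    ((0 : Int) + (List.count p (p :: rest) : Int) = 2 ∨
      ∃ v ∈ rest, p < v ∧ List.count v rest = 2) ↔
    (∃ v ∈ p :: rest, List.count v (p :: rest) = 2) := by
  constructor
  · rintro (h1 | ⟨v, hv, hpv, hv2⟩)
    · exact ⟨p, List.mem_cons_self, by omega⟩
    · refine ⟨v, List.mem_cons_of_mem _ hv, ?_⟩
      rw [count_cons_ne (by omega) rest]; exact hv2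
  · rintro ⟨v, hv, hv2⟩
    by_cases hvp : v = p
    · subst hvp; left; omega
    · right
      rcases List.mem_cons.mp hv with rfl | hv'
      · exact absurd rfl hvp
      · have hpv : p < v :=
          lt_of_le_of_ne ((List.pairwise_cons.mp hs).1 v hv') (fun h => hvp h.symm)
        refine ⟨v, hv', hpv, ?_⟩
        rw [count_cons_ne hvp rest] at hv2; exact hv2

-- B's second pass decides the multiset criterion
theorem alt_second_pass (x : List Int) :
    ((PySem.Set.ofList x).any (fun v => PySem.List.count x v == 2) = true ↔
      ∃ v ∈ x, List.count v x = 2) := by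
  simp only [List.any_eq_true, PySem.List.count_eq, beq_iff_eq]
  constructor
  · rintro ⟨v, hv, h2⟩
    exact ⟨v, (PySem.Set.mem_ofList x v).mp hv, h2⟩
  · rintro ⟨v, hv, h2⟩
    exact ⟨v, (PySem.Set.mem_ofList x v).mpr hv, h2⟩

-- ===== VERDICT (by name: the statement is the Claim_ definition above) =====
theorem desc_spec : Claim_equal_desc := by
  intro x _ hpre
  unfold Spec_desc
  match x with
  | [] => exact absurd rfl hpre
  | p :: rest =>
    simp only [desc, desc_alt, PySem.List.slice_from_one]
    by_cases hs : List.Pairwise (· ≤ ·) (p :: rest)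
    · rw [if_neg (by rw [Bool.not_eq_true, zipAny_eq_false_iff]; exact hs)]
      rw [Bool.eq_iff_iff, alt_second_pass]
      rw [descLoop_sorted rest p 0 PySem.Set.empty hs, ← runs_iff_count p rest hs]
      simp [PySem.Set.empty]
    · have hT : (((p :: rest).zip (p :: rest).tail).any (fun ab => ab.1 > ab.2)) = true := by
        cases h : (((p :: rest).zip (p :: rest).tail).any (fun ab => ab.1 > ab.2)) with
        | false => exact absurd ((zipAny_eq_false_iff _).mp h) hs
        | true => rfl
      rw [if_pos hT]
      exact descLoop_not_sorted rest p 0 PySem.Set.empty hs
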